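-- pv_equiv track=rewrite | github.com/LeoSergio/Faculdade_BSI | dataframe/indicadores.py | contar_status
-- ===== SOURCE A (Python) =====
-- def contar_status(situacoes):
--     # O parâmetro situacoes é a lista das situações do aluno em cada disciplina (extraído do histórico)
--     categorias = {
--         "APRN": 0,
--         "APR": 0,
--         "REP": 0,
--         "REPF": 0,
--         "REPMF": 0
--     }
--
--     for status in situacoes:
--         if status in categorias:
--             categorias[status] += 1
--
--     return categorias
-- ===== SOURCE B (Python) =====
-- def contar_status(situacoes):
--     # per-category counting pass: one list.count scan per fixed category
--     return {k: situacoes.count(k) for k in ("APRN", "APR", "REP", "REPF", "REPMF")}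
-- ===== Notes on version B (the rewrite author's own statement) =====
-- stated objective: idiomatic
-- what changed: Replaces the single accumulating pass that increments a running dict with a dict comprehension over the five fixed categories, scanning the list once per category with list.count.
import Mathlib
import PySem

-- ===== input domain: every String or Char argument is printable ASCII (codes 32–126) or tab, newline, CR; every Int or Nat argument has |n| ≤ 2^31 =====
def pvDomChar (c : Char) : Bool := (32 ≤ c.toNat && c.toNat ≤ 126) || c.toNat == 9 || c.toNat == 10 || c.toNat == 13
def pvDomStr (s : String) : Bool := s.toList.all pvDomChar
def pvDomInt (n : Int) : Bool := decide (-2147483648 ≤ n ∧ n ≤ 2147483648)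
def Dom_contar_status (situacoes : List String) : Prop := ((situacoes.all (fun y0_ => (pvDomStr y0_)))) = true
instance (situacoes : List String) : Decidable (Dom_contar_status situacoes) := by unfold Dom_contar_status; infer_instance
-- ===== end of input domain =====

-- B replaces A's single accumulating pass over the input with a per-category pass
-- (one list.count scan per fixed key), written as a comprehension over the five keys.


-- ===== PORT A =====
-- literal port: build the 5-key zero dict, then one pass incrementing the matched key
def contar_status (situacoes : List String) : List (String × Int) :=
  let categorias : PySem.Dict String Int :=
    PySem.Dict.ofList [("APRN", 0), ("APR", 0), ("REP", 0), ("REPF", 0), ("REPMF", 0)]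
  (situacoes.foldl (fun d status =>
    if d.contains status then d.modify status 0 (· + 1) else d) categorias).items

-- ===== PORT B =====
-- literal port of Source B: comprehension over the five fixed keys, list.count per key
def contar_status_alt (situacoes : List String) : List (String × Int) :=
  ["APRN", "APR", "REP", "REPF", "REPMF"].map
    (fun k => (k, (PySem.List.count situacoes k : Int)))

-- ===== PRECONDITION & SPEC =====
def Spec_contar_status (situacoes : List String) (out : List (String × Int)) : Prop := out = contar_status_alt situacoes
instance (situacoes : List String) (out : List (String × Int)) : Decidable (Spec_contar_status situacoes out) := by unfold Spec_contar_status; infer_instance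

-- ===== CLAIM (what is proved, stated in full; the proofs are below) =====
def Claim_equal_contar_status : Prop := ∀ (situacoes : List String), Dom_contar_status situacoes → Spec_contar_status situacoes (contar_status situacoes)

-- ===== LEMMAS AND PROOFS =====

-- the concrete 5-key dict state A's loop maintains
def pvD (a b c d e : Int) : PySem.Dict String Int :=
  PySem.Dict.mk [("APRN", a), ("APR", b), ("REP", c), ("REPF", d), ("REPMF", e)]

theorem pvStep1 (a b c d e : Int) :
    (if (pvD a b c d e).contains "APRN" then (pvD a b c d e).modify "APRN" 0 (· + 1) else pvD a b c d e) = pvD (a + 1) b c d e := by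
  simp [pvD, PySem.Dict.contains, PySem.Dict.modify, PySem.Dict.insert, PySem.Dict.getD, PySem.Dict.get?]

theorem pvStep2 (a b c d e : Int) :
    (if (pvD a b c d e).contains "APR" then (pvD a b c d e).modify "APR" 0 (· + 1) else pvD a b c d e) = pvD a (b + 1) c d e := by
  simp [pvD, PySem.Dict.contains, PySem.Dict.modify, PySem.Dict.insert, PySem.Dict.getD, PySem.Dict.get?]

theorem pvStep3 (a b c d e : Int) :
    (if (pvD a b c d e).contains "REP" then (pvD a b c d e).modify "REP" 0 (· + 1) else pvD a b c d e) = pvD a b (c + 1) d e := by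
  simp [pvD, PySem.Dict.contains, PySem.Dict.modify, PySem.Dict.insert, PySem.Dict.getD, PySem.Dict.get?]

theorem pvStep4 (a b c d e : Int) :
    (if (pvD a b c d e).contains "REPF" then (pvD a b c d e).modify "REPF" 0 (· + 1) else pvD a b c d e) = pvD a b c (d + 1) e := by
  simp [pvD, PySem.Dict.contains, PySem.Dict.modify, PySem.Dict.insert, PySem.Dict.getD, PySem.Dict.get?]

theorem pvStep5 (a b c d e : Int) :
    (if (pvD a b c d e).contains "REPMF" then (pvD a b c d e).modify "REPMF" 0 (· + 1) else pvD a b c d e) = pvD a b c d (e + 1) := by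
  simp [pvD, PySem.Dict.contains, PySem.Dict.modify, PySem.Dict.insert, PySem.Dict.getD, PySem.Dict.get?]

theorem pvStepOther (a b c d e : Int) (s : String) (h1 : s ≠ "APRN") (h2 : s ≠ "APR")
    (h3 : s ≠ "REP") (h4 : s ≠ "REPF") (h5 : s ≠ "REPMF") :
    (if (pvD a b c d e).contains s then (pvD a b c d e).modify s 0 (· + 1) else pvD a b c d e) = pvD a b c d e := by
  simp [pvD, PySem.Dict.contains_mk]
  rintro (h|h|h|h|h) <;> simp_all

theorem pvLoop_eq (l : List String) (a b c d e : Int) :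
    l.foldl (fun d status => if d.contains status then d.modify status 0 (· + 1) else d)
      (pvD a b c d e)
    = pvD (a + l.count "APRN") (b + l.count "APR") (c + l.count "REP")
        (d + l.count "REPF") (e + l.count "REPMF") := by
  induction l generalizing a b c d e with
  | nil => simp
  | cons s t ih =>
    rw [List.foldl_cons]
    by_cases h1 : s = "APRN"
    · subst h1; rw [pvStep1, ih]
      simp [pvD]; omega
    · by_cases h2 : s = "APR"
      · subst h2; rw [pvStep2, ih]
        simp [pvD, h1]; omega
      · by_cases h3 : s = "REP"
        · subst h3; rw [pvStep3, ih]
          simp [pvD, h1, h2]; omega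
        · by_cases h4 : s = "REPF"
          · subst h4; rw [pvStep4, ih]
            simp [pvD, h1, h2, h3]; omega
          · by_cases h5 : s = "REPMF"
            · subst h5; rw [pvStep5, ih]
              simp [pvD, h1, h2, h3, h4]; omega
            · rw [pvStepOther a b c d e s h1 h2 h3 h4 h5, ih]
              simp [pvD, h1, h2, h3, h4, h5]

-- ===== VERDICT (by name: the statement is the Claim_ definition above) =====
theorem contar_status_spec : Claim_equal_contar_status := by
  intro situacoes _
  unfold Spec_contar_status contar_status contar_status_alt
  show (situacoes.foldl _ (pvD 0 0 0 0 0)).items = _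
  rw [pvLoop_eq]
  simp [pvD, PySem.List.count_eq]
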